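-- pv_equiv track=rewrite | github.com/jpcano1/IBIO2240-tareas | Tarea 3/functions.py | max_matrix
-- ===== SOURCE A (Python) =====
-- def max_matrix(matrix, mode):
--     """
--     Computes the max number of a matrix by row or by column
--     @param matrix: the matrix to be operated
--     @param mode: whith this, we know
--     if we have to calculate a row or a column
--     @return: an array with the max per row/column
--     @type: list
--     """
--     maxes = list()
--     if mode == 1:
--         for row in matrix:
--             maxes.append(max(elem for elem in row))
--     elif mode == 2:
--         for i in range(len(matrix[0])):
--             aux = 0
--             for j in range(len(matrix)):
--                 if matrix[j][i] > aux:
--                     aux = matrix[j][i]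
--             maxes.append(aux)
--     return maxes
-- ===== SOURCE B (Python) =====
-- def max_matrix(matrix, mode):
--     if mode == 1:
--         return [max(row) for row in matrix]
--     if mode == 2:
--         # single row-major pass maintaining running column maxima (floored at 0, like A)
--         maxes = [0] * len(matrix[0])
--         for row in matrix:
--             maxes = [m if m >= row[i] else row[i] for i, m in enumerate(maxes)]
--         return maxes
--     return []
-- ===== Notes on version B (the rewrite author's own statement) =====
-- stated objective: alternative
-- what changed: Mode 1 becomes a list comprehension over rows; mode 2 replaces the column-by-column double index scan with a single row-major pass that rebuilds a running vector of column maxima (keeping A's 0 floor), so each row is traversed once in order instead of the matrix being re-indexed per column.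
import Mathlib
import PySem

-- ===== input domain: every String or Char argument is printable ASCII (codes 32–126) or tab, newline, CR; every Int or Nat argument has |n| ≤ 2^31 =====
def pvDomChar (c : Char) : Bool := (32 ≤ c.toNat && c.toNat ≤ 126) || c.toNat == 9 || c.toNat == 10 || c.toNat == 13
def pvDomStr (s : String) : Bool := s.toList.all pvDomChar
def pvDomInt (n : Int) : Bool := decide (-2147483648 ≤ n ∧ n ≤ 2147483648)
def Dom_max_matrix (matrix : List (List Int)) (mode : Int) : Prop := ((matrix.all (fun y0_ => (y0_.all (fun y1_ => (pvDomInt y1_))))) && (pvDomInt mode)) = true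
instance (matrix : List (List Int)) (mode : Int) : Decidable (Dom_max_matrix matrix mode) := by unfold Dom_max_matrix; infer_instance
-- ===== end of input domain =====

-- B computes the same row/column maxima with a different decomposition: a comprehension for mode 1
-- and, for mode 2, one row-major pass rebuilding a running vector of column maxima instead of A's
-- per-column index scans.  Same asymptotic cost; equivalence is proved on Pre_ (inputs where A returns).

-- both Pythons take a plain max over a row (A: max(elem for elem in row), B: max(row));
-- the default 0 is unreached under Pre_ (rows nonempty in mode 1)
def pvRowMax (row : List Int) : Int := (PySem.List.max? row (fun x => x)).getD 0

-- ===== PORT A =====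

def max_matrix (matrix : List (List Int)) (mode : Int) : List Int :=
  if mode = 1 then
    matrix.foldl (fun maxes row => maxes ++ [pvRowMax row]) []
  else if mode = 2 then
    (PySem.List.pyRange 0 ((PySem.List.pyGetD matrix 0 ([] : List Int)).length : Int) 1).foldl
      (fun maxes i =>
        let aux :=
          (PySem.List.pyRange 0 (matrix.length : Int) 1).foldl
            (fun aux j =>
              if PySem.List.pyGetD (PySem.List.pyGetD matrix j ([] : List Int)) i 0 > aux then
                PySem.List.pyGetD (PySem.List.pyGetD matrix j ([] : List Int)) i 0
              else aux) 0
        maxes ++ [aux]) []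
  else []

-- ===== PORT B =====

def max_matrix_alt (matrix : List (List Int)) (mode : Int) : List Int :=
  if mode = 1 then
    matrix.map pvRowMax
  else if mode = 2 then
    matrix.foldl
      (fun maxes row =>
        (PySem.List.enumerate maxes).map
          (fun p => if p.2 ≥ PySem.List.pyGetD row p.1 0 then p.2 else PySem.List.pyGetD row p.1 0))
      (List.replicate (PySem.List.pyGetD matrix 0 ([] : List Int)).length 0)
  else []

-- ===== PRECONDITION & SPEC =====
-- Pre_ excludes exactly the inputs where Python A raises: an empty row in mode 1 (ValueError from
-- max()), and in mode 2 an empty matrix or a row shorter than row 0 (IndexError).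
def Pre_max_matrix (matrix : List (List Int)) (mode : Int) : Prop :=
  (mode = 1 → ∀ row ∈ matrix, row ≠ []) ∧
  (mode = 2 → matrix ≠ [] ∧ ∀ row ∈ matrix, (matrix.headD []).length ≤ row.length)
instance (matrix : List (List Int)) (mode : Int) : Decidable (Pre_max_matrix matrix mode) := by
  unfold Pre_max_matrix; infer_instance

def pvWitness_max_matrix : List (List Int) × Int := ([[1, -2], [3, 4]], 2)

def Spec_max_matrix (matrix : List (List Int)) (mode : Int) (out : List Int) : Prop := out = max_matrix_alt matrix mode
instance (matrix : List (List Int)) (mode : Int) (out : List Int) : Decidable (Spec_max_matrix matrix mode out) := by unfold Spec_max_matrix; infer_instance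

-- ===== CLAIM (what is proved, stated in full; the proofs are below) =====
def Claim_equal_max_matrix : Prop := ∀ (matrix : List (List Int)) (mode : Int), Dom_max_matrix matrix mode → Pre_max_matrix matrix mode → Spec_max_matrix matrix mode (max_matrix matrix mode)

-- ===== LEMMAS AND PROOFS =====

-- running column maximum of column i over `rows`, started at a
def pvColFold (rows : List (List Int)) (i : Int) (a : Int) : Int :=
  rows.foldl
    (fun aux row => if PySem.List.pyGetD row i 0 > aux then PySem.List.pyGetD row i 0 else aux) a

-- B's one step on a state of the shape (range n).map g keeps that shape, folding each column
theorem pvB_fold_shape (rows : List (List Int)) (n : Nat) (g : Int → Int) :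
    rows.foldl
      (fun maxes row =>
        (PySem.List.enumerate maxes).map
          (fun p => if p.2 ≥ PySem.List.pyGetD row p.1 0 then p.2 else PySem.List.pyGetD row p.1 0))
      ((PySem.List.pyRange 0 (n : Int) 1).map g)
    = (PySem.List.pyRange 0 (n : Int) 1).map (fun i => pvColFold rows i (g i)) := by
  induction rows generalizing g with
  | nil =>
    simp [pvColFold]
  | cons row rows ih =>
    simp only [List.foldl_cons]
    have hstep :
        (PySem.List.enumerate ((PySem.List.pyRange 0 (n : Int) 1).map g)).map
          (fun p => if p.2 ≥ PySem.List.pyGetD row p.1 0 then p.2 else PySem.List.pyGetD row p.1 0)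
        = (PySem.List.pyRange 0 (n : Int) 1).map
            (fun i => if PySem.List.pyGetD row i 0 > g i then PySem.List.pyGetD row i 0 else g i) := by
      rw [PySem.List.enumerate_eq_map_pyRange (d := (0 : Int))]
      have hlen : PySem.List.len ((PySem.List.pyRange 0 (n : Int) 1).map g) = (n : Int) := by
        simp [PySem.List.len, PySem.List.length_pyRange_one]
      rw [hlen, List.map_map]
      apply List.map_congr_left
      intro i hi
      have hib := (PySem.List.mem_pyRange_one).1 hi
      have : PySem.List.pyGetD ((PySem.List.pyRange 0 (n : Int) 1).map g) i 0 = g i :=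
        PySem.List.pyGetD_map_pyRange_of_nonneg g (n : Int) i 0 hib.1 hib.2
      simp only [Function.comp, this]
      by_cases h : PySem.List.pyGetD row i 0 > g i
      · rw [if_neg (by omega), if_pos h]
      · rw [if_pos (by omega), if_neg h]
    rw [hstep, ih]
    apply List.map_congr_left
    intro i _
    simp [pvColFold]

theorem max_matrix_eq_alt (matrix : List (List Int)) (mode : Int) :
    max_matrix matrix mode = max_matrix_alt matrix mode := by
  unfold max_matrix max_matrix_alt
  by_cases h1 : mode = 1
  · simp only [h1]
    rw [PySem.List.foldl_append_singleton_eq_map]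
    simp
  · by_cases h2 : mode = 2
    · simp only [h2]
      set cols := (PySem.List.pyGetD matrix 0 ([] : List Int)).length with hcols
      -- A side: inner index loop over j is a fold over the rows themselves
      have hA :
          (PySem.List.pyRange 0 ((cols : Nat) : Int) 1).foldl
            (fun maxes i =>
              let aux :=
                (PySem.List.pyRange 0 (matrix.length : Int) 1).foldl
                  (fun aux j =>
                    if PySem.List.pyGetD (PySem.List.pyGetD matrix j ([] : List Int)) i 0 > aux then
                      PySem.List.pyGetD (PySem.List.pyGetD matrix j ([] : List Int)) i 0
                    else aux) 0
              maxes ++ [aux]) []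
          = (PySem.List.pyRange 0 ((cols : Nat) : Int) 1).map (fun i => pvColFold matrix i 0) := by
        have hinner : ∀ i : Int,
            (PySem.List.pyRange 0 (matrix.length : Int) 1).foldl
              (fun aux j =>
                if PySem.List.pyGetD (PySem.List.pyGetD matrix j ([] : List Int)) i 0 > aux then
                  PySem.List.pyGetD (PySem.List.pyGetD matrix j ([] : List Int)) i 0
                else aux) 0
            = pvColFold matrix i 0 := by
          intro i
          exact PySem.List.foldl_pyRange_zero_pyGetD' matrix ([] : List Int)
            (fun aux row =>
              if PySem.List.pyGetD row i 0 > aux then PySem.List.pyGetD row i 0 else aux) 0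
        simp only [hinner]
        rw [PySem.List.foldl_append_singleton_eq_map]
        simp
      rw [hA]
      -- B side: the replicate start is (range cols).map (const 0)
      have hrep : List.replicate cols (0 : Int)
          = (PySem.List.pyRange 0 ((cols : Nat) : Int) 1).map (fun _ => (0 : Int)) := by
        rw [List.map_const']
        simp [PySem.List.length_pyRange_one]
      rw [hrep, pvB_fold_shape]
      norm_num
    · simp [if_neg h1, if_neg h2]

-- ===== VERDICT (by name: the statement is the Claim_ definition above) =====
theorem max_matrix_spec : Claim_equal_max_matrix := by
  intro matrix mode _ _
  unfold Spec_max_matrix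
  exact max_matrix_eq_alt matrix mode
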